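-- pv_equiv track=rewrite | github.com/Jh123x/AdventOfCode | 2023/day3/main.py | get_adj_no
-- ===== SOURCE A (Python) =====
-- from typing import List, Optional, Set, Tuple
--
-- DIRECTIONS = [
--     [-1, -1],  # top left
--     [-1, 0],  # top
--     [-1, 1],  # top right
--     [0, -1],  # left
--     [0, 1],  # right
--     [1, -1],  # bottom left
--     [1, 0],  # bottom
--     [1, 1],  # bottom right
-- ]
--
-- def get_adj_no(lines: List[str], y: int, x: int) -> List[int]:
--     visited = set()
--     nos = []
--     for dx, dy in DIRECTIONS:
--         y_loc = y + dy
--         x_loc = x + dx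
--         if y_loc < 0 or y_loc >= len(lines) or x_loc < 0 or x_loc >= len(lines[0]):
--             continue
--         if not lines[y_loc][x_loc].isdigit():
--             continue
--         no = parse_no(lines, y_loc, x_loc, visited)
--         if no is None:
--             continue
--         nos.append(no)
--     return nos
--
-- def parse_no(lines: List[str], y: int, x: int, visited: Set[Tuple[int, int]]) -> Optional[int]:
--     left_idx = x
--     right_idx = x
--     if (y, x) in visited:
--         return None
--
--     # Slide left
--     while left_idx >= 0 and lines[y][left_idx].isdigit():
--         left_idx -= 1
--
--     # Slide right
--     while right_idx < len(lines[0]) and lines[y][right_idx].isdigit():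
--         right_idx += 1
--
--     for i in range(left_idx+1, right_idx):
--         visited.add((y, i))
--
--     return int(lines[y][left_idx+1:right_idx])
-- ===== SOURCE B (Python) =====
-- from typing import List, Tuple
--
--
-- def _row_runs(lines: List[str], w: int, r: int) -> List[Tuple[int, int, int]]:
--     """Maximal digit runs (start, end, value) of row r truncated to width w."""
--     if r < 0 or r >= len(lines):
--         return []
--     row = lines[r][:w]
--     runs = []
--     i = 0
--     while i < len(row):
--         if row[i].isdigit():
--             j = i
--             while j < len(row) and row[j].isdigit():
--                 j += 1
--             runs.append((i, j, int(row[i:j])))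
--             i = j
--         else:
--             i += 1
--     return runs
--
--
-- def get_adj_no(lines: List[str], y: int, x: int) -> List[int]:
--     if not lines:
--         return []
--     w = len(lines[0])
--     result = []
--     taken = set()
--     for r, c in ((y - 1, x - 1), (y, x - 1), (y + 1, x - 1),
--                  (y - 1, x), (y + 1, x),
--                  (y - 1, x + 1), (y, x + 1), (y + 1, x + 1)):
--         if 0 <= c < w:
--             for s, e, v in _row_runs(lines, w, r):
--                 if s <= c < e and (r, s) not in taken:
--                     taken.add((r, s))
--                     result.append(v)
--     return result
-- ===== Notes on version B (the rewrite author's own statement) =====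
-- stated objective: alternative
-- what changed: B precomputes each neighbouring row's maximal digit runs (start, end, value) by one left-to-right scan and collects a run when a probed cell falls inside it, deduplicating by run start, instead of A's per-probe left/right sliding expansion with a per-cell visited set.
import Mathlib
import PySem

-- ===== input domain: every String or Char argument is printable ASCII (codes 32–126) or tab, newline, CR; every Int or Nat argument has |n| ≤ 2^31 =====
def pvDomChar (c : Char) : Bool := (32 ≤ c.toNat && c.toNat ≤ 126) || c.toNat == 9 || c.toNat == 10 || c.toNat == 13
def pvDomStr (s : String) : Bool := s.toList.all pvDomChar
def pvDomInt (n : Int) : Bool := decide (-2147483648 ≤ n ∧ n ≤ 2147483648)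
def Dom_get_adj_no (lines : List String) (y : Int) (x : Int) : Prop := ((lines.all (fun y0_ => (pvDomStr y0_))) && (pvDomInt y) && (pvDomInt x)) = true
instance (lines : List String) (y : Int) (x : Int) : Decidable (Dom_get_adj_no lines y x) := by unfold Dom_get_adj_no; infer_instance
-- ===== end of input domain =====

-- B replaces A's per-probe left/right sliding with a visited-cell set by a single
-- left-to-right scan of each neighbouring row into maximal digit runs, deduplicated by
-- run start (objective: alternative). Return-value equivalence on Pre_ (A raises outside it).


-- ===== PORT A =====

-- single-character str.isdigit (A and B both test characters this way)
def pvDig (c : Char) : Bool := PySem.Chars.isdigit c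

-- lines[r][i] read with an out-of-range default: on Pre_ inputs A only reads in range
def pvCharAt (t : List Char) (i : Int) : Char :=
  if 0 ≤ i then t.getD i.toNat ' ' else ' '

-- lines[r] (A only reads rows at indices 0 ≤ r < len(lines))
def pvRow (lines : List String) (r : Int) : List Char :=
  (if 0 ≤ r then lines.getD r.toNat "" else "").toList

-- while left_idx >= 0 and lines[y][left_idx].isdigit(): left_idx -= 1  (fuel start+1 is exact)
def pvSlideL (t : List Char) : Nat → Int → Int
  | 0, i => i
  | f+1, i => if 0 ≤ i ∧ pvDig (pvCharAt t i) = true then pvSlideL t f (i-1) else i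

-- while right_idx < len(lines[0]) and lines[y][right_idx].isdigit(): right_idx += 1
def pvSlideR (t : List Char) (w : Int) : Nat → Int → Int
  | 0, i => i
  | f+1, i => if i < w ∧ pvDig (pvCharAt t i) = true then pvSlideR t w f (i+1) else i

-- parse_no; int(...) ported as PySem.Int.ofStr? (the slice is a nonempty digit string, so it never fails)
def pvParseNo (lines : List String) (w y x : Int) (visited : PySem.Set (Int × Int)) :
    Option Int × PySem.Set (Int × Int) :=
  if (y, x) ∈ visited then (none, visited)
  else
    let t := pvRow lines y
    let l := pvSlideL t (x.toNat + 1) x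
    let r := pvSlideR t w (w - x).toNat x
    let visited' := (PySem.List.pyRange (l+1) r 1).foldl
      (fun v i => PySem.Set.add v (y, i)) visited
    (some ((PySem.Int.ofStr? (String.ofList (PySem.List.slice t (some (l+1)) (some r)))).getD 0),
     visited')

-- one iteration of A's direction loop (yl = y + dy, xl = x + dx)
def pvAStep (lines : List String) (w : Int) (st : PySem.Set (Int × Int) × List Int)
    (yl xl : Int) : PySem.Set (Int × Int) × List Int :=
  if yl < 0 ∨ (lines.length : Int) ≤ yl ∨ xl < 0 ∨ w ≤ xl then st
  else if ¬ (pvDig (pvCharAt (pvRow lines yl) xl) = true) then st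
  else
    match pvParseNo lines w yl xl st.1 with
    | (none, v') => (v', st.2)
    | (some no, v') => (v', st.2 ++ [no])

def pvDirections : List (Int × Int) :=
  [(-1,-1), (-1,0), (-1,1), (0,-1), (0,1), (1,-1), (1,0), (1,1)]

def get_adj_no (lines : List String) (y : Int) (x : Int) : List Int :=
  -- w = len(lines[0]); in Python only evaluated behind the bounds guard, hence never on []
  let w : Int := ((lines.headD "").toList.length : Int)
  (pvDirections.foldl (fun st d => pvAStep lines w st (y + d.2) (x + d.1)) ([], [])).2

-- ===== PORT B =====

-- maximal digit runs (start, end, int value) of a row; the outer while is ported with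
-- fuel = remaining length (exact: each iteration consumes ≥ 1 character), the inner
-- while as takeWhile/dropWhile
def pvRunsF : Nat → List Char → Int → List (Int × Int × Int)
  | 0, _, _ => []
  | _+1, [], _ => []
  | n+1, c :: rest, i =>
    if pvDig c = true then
      (i, i + (((c :: rest).takeWhile pvDig).length : Int),
        (PySem.Int.ofStr? (String.ofList ((c :: rest).takeWhile pvDig))).getD 0)
      :: pvRunsF n ((c :: rest).dropWhile pvDig) (i + (((c :: rest).takeWhile pvDig).length : Int))
    else pvRunsF n rest (i + 1)

def pvRuns (u : List Char) (i : Int) : List (Int × Int × Int) := pvRunsF u.length u i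

-- _row_runs: [] for an out-of-range row, else the runs of lines[r][:w]
def pvRowRuns (lines : List String) (w r : Int) : List (Int × Int × Int) :=
  if r < 0 ∨ (lines.length : Int) ≤ r then []
  else pvRuns ((lines.getD r.toNat "").toList.take w.toNat) 0

-- B's inner for loop over the runs of row r at probe column c
def pvBFold (r c : Int) (L : List (Int × Int × Int))
    (st : PySem.Set (Int × Int) × List Int) : PySem.Set (Int × Int) × List Int :=
  L.foldl (fun st2 run =>
    if run.1 ≤ c ∧ c < run.2.1 ∧ ¬ ((r, run.1) ∈ st2.1) then
      (PySem.Set.add st2.1 (r, run.1), st2.2 ++ [run.2.2])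
    else st2) st

-- one probe of B
def pvBStep (lines : List String) (w : Int) (st : PySem.Set (Int × Int) × List Int)
    (r c : Int) : PySem.Set (Int × Int) × List Int :=
  if 0 ≤ c ∧ c < w then pvBFold r c (pvRowRuns lines w r) st else st

def get_adj_no_alt (lines : List String) (y : Int) (x : Int) : List Int :=
  if lines = [] then []
  else
    let w : Int := ((lines.headD "").toList.length : Int)
    ([(y-1, x-1), (y, x-1), (y+1, x-1), (y-1, x), (y+1, x),
      (y-1, x+1), (y, x+1), (y+1, x+1)].foldl
      (fun st p => pvBStep lines w st p.1 p.2) ([], [])).2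

-- ===== PRECONDITION & SPEC =====

-- Pre_ excludes exactly the ragged-grid inputs on which Python A raises IndexError and
-- returns nothing: a probed cell at a column below len(lines[0]) but beyond the end of its
-- own shorter row, or a probed digit run reaching the end of a row shorter than len(lines[0]).
def pvProbeOK (lines : List String) (w r c : Int) : Bool :=
  decide (r < 0) || decide ((lines.length : Int) ≤ r) || decide (c < 0) || decide (w ≤ c) ||
  (decide (c < ((pvRow lines r).length : Int)) &&
    (!(pvDig (pvCharAt (pvRow lines r) c)) ||
     !(((pvRow lines r).drop c.toNat).all pvDig) ||
     decide (w ≤ ((pvRow lines r).length : Int))))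

def Pre_get_adj_no (lines : List String) (y : Int) (x : Int) : Prop :=
  lines = [] ∨
  (let w : Int := ((lines.headD "").toList.length : Int)
   pvProbeOK lines w (y-1) (x-1) = true ∧ pvProbeOK lines w y (x-1) = true ∧
   pvProbeOK lines w (y+1) (x-1) = true ∧ pvProbeOK lines w (y-1) x = true ∧
   pvProbeOK lines w (y+1) x = true ∧ pvProbeOK lines w (y-1) (x+1) = true ∧
   pvProbeOK lines w y (x+1) = true ∧ pvProbeOK lines w (y+1) (x+1) = true)

instance (lines : List String) (y : Int) (x : Int) : Decidable (Pre_get_adj_no lines y x) := by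
  unfold Pre_get_adj_no; infer_instance

def pvWitness_get_adj_no : List String × Int × Int := (["467..114..", "...*......"], 1, 3)

def Spec_get_adj_no (lines : List String) (y : Int) (x : Int) (out : List Int) : Prop :=
  out = get_adj_no_alt lines y x
instance (lines : List String) (y : Int) (x : Int) (out : List Int) :
    Decidable (Spec_get_adj_no lines y x out) := by unfold Spec_get_adj_no; infer_instance

-- ===== CLAIM (what is proved, stated in full; the proofs are below) =====
def Claim_equal_get_adj_no : Prop := ∀ (lines : List String) (y : Int) (x : Int),
  Dom_get_adj_no lines y x → Pre_get_adj_no lines y x →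
  Spec_get_adj_no lines y x (get_adj_no lines y x)


-- ===== LEMMAS AND PROOFS =====

lemma pvCharAt_nil (i : Int) : pvCharAt [] i = ' ' := by
  unfold pvCharAt; split <;> simp

lemma pvCharAt_zero_cons (d : Char) (l : List Char) : pvCharAt (d :: l) 0 = d := rfl

lemma pvCharAt_out {t : List Char} {i : Int} (h : i < 0 ∨ (t.length : Int) ≤ i) :
    pvCharAt t i = ' ' := by
  unfold pvCharAt
  rcases h with h | h
  · rw [if_neg (by omega)]
  · rw [if_pos (by omega)]
    exact List.getD_eq_default _ _ (by omega)

lemma pvCharAt_eq {t : List Char} {i : Int} (h0 : 0 ≤ i) (hl : i < (t.length : Int)) :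
    pvCharAt t i = t[i.toNat]'(by omega) := by
  unfold pvCharAt
  rw [if_pos h0]
  exact List.getD_eq_getElem _ _ (by omega)

lemma pvCharAt_take {t : List Char} {w : Nat} {i : Int} (h0 : 0 ≤ i) (hw : i < (w : Int)) :
    pvCharAt (t.take w) i = pvCharAt t i := by
  unfold pvCharAt
  rw [if_pos h0, if_pos h0]
  simp only [List.getD_eq_getElem?_getD]
  rw [List.getElem?_take_of_lt (by omega)]

lemma pvCharAt_drop {t : List Char} (k : Nat) {i : Int} (h0 : 0 ≤ i) :
    pvCharAt (t.drop k) i = pvCharAt t (i + k) := by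
  unfold pvCharAt
  rw [if_pos h0, if_pos (by omega)]
  simp only [List.getD_eq_getElem?_getD, List.getElem?_drop]
  congr 2
  omega

-- the head of dropWhile fails the predicate
lemma pvDropWhile_head {α : Type} (p : α → Bool) :
    ∀ (l : List α) (d : α) (rest : List α), l.dropWhile p = d :: rest → p d = false := by
  intro l
  induction l with
  | nil => intro d rest h; simp at h
  | cons a l ih =>
    intro d rest h
    rw [List.dropWhile_cons] at h
    by_cases hp : p a = true
    · rw [if_pos hp] at h; exact ih d rest h
    · rw [if_neg hp] at h
      cases h
      simpa using hp

lemma pvTake_len_takeWhile {α : Type} (p : α → Bool) (l : List α) :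
    l.take (l.takeWhile p).length = l.takeWhile p :=
  (List.prefix_iff_eq_take.mp (l.takeWhile_prefix p)).symm

-- ---- slide specifications ----

lemma pvSlideL_spec (t : List Char) : ∀ (f : Nat) (i : Int), -1 ≤ i → i < (f : Int) →
    pvSlideL t f i ≤ i ∧ -1 ≤ pvSlideL t f i ∧
    (∀ j : Int, pvSlideL t f i < j → j ≤ i → pvDig (pvCharAt t j) = true) ∧
    (pvSlideL t f i = -1 ∨ pvDig (pvCharAt t (pvSlideL t f i)) = false) := by
  intro f
  induction f with
  | zero =>
    intro i h1 h2
    have h2' : i < 0 := by exact_mod_cast h2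
    have hi : i = -1 := by omega
    have h0 : pvSlideL t 0 i = i := rfl
    rw [h0]
    subst hi
    exact ⟨le_refl _, le_refl _, fun j hj1 hj2 => absurd hj2 (by omega), Or.inl rfl⟩
  | succ f ih =>
    intro i h1 h2
    by_cases hc : 0 ≤ i ∧ pvDig (pvCharAt t i) = true
    · have hstep : pvSlideL t (f+1) i = pvSlideL t f (i-1) := by
        simp only [pvSlideL, if_pos hc]
      obtain ⟨ha, hb, hr, hd⟩ := ih (i-1) (by omega) (by push_cast at h2 ⊢; omega)
      rw [hstep]
      refine ⟨by omega, hb, ?_, hd⟩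
      intro j hj1 hj2
      by_cases hji : j = i
      · subst hji; exact hc.2
      · exact hr j hj1 (by omega)
    · have hstep : pvSlideL t (f+1) i = i := by
        simp only [pvSlideL, if_neg hc]
      rw [hstep]
      refine ⟨le_refl _, h1, ?_, ?_⟩
      · intro j hj1 hj2; exact absurd hj2 (by omega)
      · rcases (not_and_or.mp hc) with h | h
        · left; omega
        · right; simpa using h

lemma pvSlideR_spec (t : List Char) (w : Int) : ∀ (f : Nat) (i : Int), i ≤ w →
    (w - i : Int) ≤ (f : Int) →
    i ≤ pvSlideR t w f i ∧ pvSlideR t w f i ≤ w ∧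
    (∀ j : Int, i ≤ j → j < pvSlideR t w f i → pvDig (pvCharAt t j) = true) ∧
    (pvSlideR t w f i = w ∨ pvDig (pvCharAt t (pvSlideR t w f i)) = false) := by
  intro f
  induction f with
  | zero =>
    intro i h1 h2
    have h2' : w - i ≤ 0 := by exact_mod_cast h2
    have hi : i = w := by omega
    have h0 : pvSlideR t w 0 i = i := rfl
    rw [h0]
    subst hi
    exact ⟨le_refl _, le_refl _, fun j hj1 hj2 => absurd hj2 (by omega), Or.inl rfl⟩
  | succ f ih =>
    intro i h1 h2
    by_cases hc : i < w ∧ pvDig (pvCharAt t i) = true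
    · have hstep : pvSlideR t w (f+1) i = pvSlideR t w f (i+1) := by
        simp only [pvSlideR, if_pos hc]
      obtain ⟨ha, hb, hr, hd⟩ := ih (i+1) (by omega) (by push_cast at h2 ⊢; omega)
      rw [hstep]
      refine ⟨by omega, hb, ?_, hd⟩
      intro j hj1 hj2
      by_cases hji : j = i
      · subst hji; exact hc.2
      · exact hr j (by omega) hj2
    · have hstep : pvSlideR t w (f+1) i = i := by
        simp only [pvSlideR, if_neg hc]
      rw [hstep]
      refine ⟨le_refl _, h1, ?_, ?_⟩
      · intro j hj1 hj2; exact absurd hj2 (by omega)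
      · rcases (not_and_or.mp hc) with h | h
        · left; omega
        · right; simpa using h

-- ---- runs characterisation ----

lemma pvRunsF_nil (n : Nat) (i : Int) : pvRunsF n [] i = [] := by
  cases n <;> rfl

lemma pvRunsF_cons_pos (n : Nat) {c : Char} (rest : List Char) (i : Int) (h : pvDig c = true) :
    pvRunsF (n+1) (c :: rest) i =
      (i, i + (((c :: rest).takeWhile pvDig).length : Int),
        (PySem.Int.ofStr? (String.ofList ((c :: rest).takeWhile pvDig))).getD 0)
      :: pvRunsF n ((c :: rest).dropWhile pvDig) (i + (((c :: rest).takeWhile pvDig).length : Int)) := by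
  simp only [pvRunsF]
  rw [if_pos h]

lemma pvRunsF_cons_neg (n : Nat) {c : Char} (rest : List Char) (i : Int) (h : pvDig c = false) :
    pvRunsF (n+1) (c :: rest) i = pvRunsF n rest (i + 1) := by
  simp only [pvRunsF]
  rw [if_neg (by simp [h])]

def pvRunProps (u : List Char) (i s e v : Int) : Prop :=
  i ≤ s ∧ s < e ∧ e ≤ i + u.length ∧
  (∀ j : Int, s ≤ j → j < e → pvDig (pvCharAt u (j - i)) = true) ∧
  (s = i ∨ pvDig (pvCharAt u (s - i - 1)) = false) ∧
  (e = i + u.length ∨ pvDig (pvCharAt u (e - i)) = false) ∧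
  v = (PySem.Int.ofStr? (String.ofList ((u.drop (s - i).toNat).take (e - s).toNat))).getD 0

lemma pvRuns_sound_aux : ∀ (n : Nat) (u : List Char), u.length ≤ n → ∀ (i s e v : Int),
    (s, e, v) ∈ pvRunsF n u i → pvRunProps u i s e v := by
  intro n
  induction n with
  | zero =>
    intro u hu i s e v hmem
    simp [pvRunsF] at hmem
  | succ n ihn =>
    intro u hu i s e v hmem
    cases u with
    | nil => rw [pvRunsF_nil] at hmem; simp at hmem
    | cons c rest =>
      by_cases hdig : pvDig c = true
      · -- a run starts here
        set k : Nat := ((c :: rest).takeWhile pvDig).length with hk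
        clear_value k
        have hrun_take : (c :: rest).take k = (c :: rest).takeWhile pvDig := by
          rw [hk]; exact pvTake_len_takeWhile _ _
        have htw : (c :: rest).takeWhile pvDig = c :: rest.takeWhile pvDig :=
          List.takeWhile_cons_of_pos hdig
        have hk1 : 1 ≤ k := by rw [hk, htw]; simp
        have hkle : k ≤ rest.length + 1 := by
          have := ((c :: rest).takeWhile_prefix pvDig).length_le
          simp only [List.length_cons] at this
          omega
        have hdrop : (c :: rest).dropWhile pvDig = (c :: rest).drop k := by
          conv_rhs => rw [← List.takeWhile_append_dropWhile (p := pvDig) (l := c :: rest)]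
          rw [List.drop_left' hk.symm]
        have hlen : k + ((c :: rest).dropWhile pvDig).length = rest.length + 1 := by
          rw [hdrop, List.length_drop]
          simp only [List.length_cons]
          omega
        have hlenZ : (k : Int) + (((c :: rest).dropWhile pvDig).length : Int)
            = (rest.length : Int) + 1 := by exact_mod_cast hlen
        have hcell : ∀ j : Int, 0 ≤ j → j < (k : Int) →
            pvDig (pvCharAt (c :: rest) j) = true := by
          intro j h0 hjk
          have hjl : j.toNat < (c :: rest).length := by
            simp only [List.length_cons]; omega
          rw [pvCharAt_eq h0 (by omega)]
          have hsome : ((c :: rest).takeWhile pvDig)[j.toNat]? =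
              some ((c :: rest)[j.toNat]'hjl) := by
            rw [← hrun_take, List.getElem?_take_of_lt (by omega),
              List.getElem?_eq_getElem hjl]
          exact List.mem_takeWhile_imp (List.mem_of_getElem? hsome)
        have hboundk : (k : Int) = ((c :: rest).length : Int) ∨
            pvDig (pvCharAt (c :: rest) (k : Int)) = false := by
          cases hdp : (c :: rest).dropWhile pvDig with
          | nil =>
            left
            rw [hdp] at hlen
            simp only [List.length_nil] at hlen
            simp only [List.length_cons]
            omega
          | cons d tl =>
            right
            have hdd : pvDig d = false := pvDropWhile_head _ _ _ _ hdp
            have h1 := pvCharAt_drop (t := c :: rest) k (i := 0) le_rfl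
            rw [← hdrop, hdp, pvCharAt_zero_cons] at h1
            rw [show ((0 : Int) + (k : Int)) = (k : Int) by ring] at h1
            rw [← h1]
            exact hdd
        rw [pvRunsF_cons_pos n rest i hdig, ← hk] at hmem
        rcases List.mem_cons.mp hmem with hhead | htail
        · -- the emitted run itself
          have hs : s = i := congrArg Prod.fst hhead
          have he : e = i + (k : Int) := by
            have := congrArg (fun p => p.2.1) hhead; simpa using this
          have hv : v = (PySem.Int.ofStr? (String.ofList ((c :: rest).takeWhile pvDig))).getD 0 := by
            have := congrArg (fun p => p.2.2) hhead; simpa using this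
          unfold pvRunProps
          rw [hs, he, hv]
          refine ⟨le_refl _, by omega, ?_, ?_, Or.inl rfl, ?_, ?_⟩
          · simp only [List.length_cons]; push_cast; omega
          · intro j hj1 hj2
            exact hcell (j - i) (by omega) (by omega)
          · rcases hboundk with hbl | hbr
            · left; omega
            · right
              rw [show (i + (k : Int) - i) = (k : Int) by ring]
              exact hbr
          · have harg : ((c :: rest).drop ((i - i : Int)).toNat).take ((i + (k : Int) - i)).toNat
                = (c :: rest).takeWhile pvDig := by
              rw [show (i - i : Int) = 0 by ring, show (i + (k : Int) - i) = (k : Int) by ring]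
              simp only [Int.toNat_zero, List.drop_zero, Int.toNat_natCast]
              exact hrun_take
            rw [harg]
        · -- a run of the remainder
          have hlrest : ((c :: rest).dropWhile pvDig).length ≤ n := by
            simp only [List.length_cons] at hu
            omega
          obtain ⟨p1, p2, p3, p4, p5, p6, p7⟩ := ihn _ hlrest _ _ _ _ htail
          have hshift : ∀ m : Int, 0 ≤ m →
              pvCharAt ((c :: rest).dropWhile pvDig) m = pvCharAt (c :: rest) (m + (k : Int)) := by
            intro m hm
            rw [hdrop]
            exact pvCharAt_drop k hm
          have hsik : s ≠ i + (k : Int) := by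
            intro hsi
            have hds := p4 s (le_refl _) p2
            rw [hsi] at hds
            rw [show (i + (k : Int) - (i + (k : Int))) = 0 by ring] at hds
            cases hdp : (c :: rest).dropWhile pvDig with
            | nil =>
              rw [hdp] at p3
              simp only [List.length_nil] at p3
              omega
            | cons d tl =>
              rw [hdp, pvCharAt_zero_cons] at hds
              have := pvDropWhile_head _ _ _ _ hdp
              rw [this] at hds
              exact Bool.false_ne_true hds
          refine ⟨by omega, p2, ?_, ?_, ?_, ?_, ?_⟩
          · simp only [List.length_cons]
            omega
          · intro j hj1 hj2
            have := p4 j hj1 hj2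
            rw [hshift (j - (i + (k : Int))) (by omega)] at this
            rw [show (j - (i + (k : Int)) + (k : Int)) = j - i by ring] at this
            exact this
          · right
            rcases p5 with h5 | h5
            · exact absurd h5 hsik
            · rw [hshift (s - (i + (k : Int)) - 1) (by omega)] at h5
              rw [show (s - (i + (k : Int)) - 1 + (k : Int)) = s - i - 1 by ring] at h5
              exact h5
          · rcases p6 with h6 | h6
            · left
              simp only [List.length_cons]
              omega
            · right
              rw [hshift (e - (i + (k : Int))) (by omega)] at h6
              rw [show (e - (i + (k : Int)) + (k : Int)) = e - i by ring] at h6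
              exact h6
          · rw [p7]
            congr 2
            rw [hdrop, List.drop_drop]
            rw [show k + (s - (i + (k : Int))).toNat = (s - i).toNat from by omega]
      · -- no run starts at this cell
        have hdig' : pvDig c = false := by simpa using hdig
        rw [pvRunsF_cons_neg n rest i hdig'] at hmem
        have hlrest : rest.length ≤ n := by
          simp only [List.length_cons] at hu; omega
        obtain ⟨p1, p2, p3, p4, p5, p6, p7⟩ := ihn _ hlrest _ _ _ _ hmem
        have hshift : ∀ m : Int, 0 ≤ m →
            pvCharAt rest m = pvCharAt (c :: rest) (m + 1) := by
          intro m hm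
          have h1 := pvCharAt_drop (t := c :: rest) 1 (i := m) hm
          simpa using h1
        refine ⟨by omega, p2, ?_, ?_, ?_, ?_, ?_⟩
        · simp only [List.length_cons]; push_cast at p3 ⊢; omega
        · intro j hj1 hj2
          have := p4 j hj1 hj2
          rw [hshift (j - (i + 1)) (by omega)] at this
          rw [show (j - (i + 1) + (1 : Int)) = j - i by ring] at this
          exact this
        · right
          by_cases hs1 : s = i + 1
          · rw [hs1]
            rw [show (i + 1 - i - 1 : Int) = 0 by ring, pvCharAt_zero_cons]
            exact hdig'
          · rcases p5 with h5 | h5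
            · exact absurd h5 hs1
            · rw [hshift (s - (i + 1) - 1) (by omega)] at h5
              rw [show (s - (i + 1) - 1 + (1 : Int)) = s - i - 1 by ring] at h5
              exact h5
        · rcases p6 with h6 | h6
          · left; simp only [List.length_cons]; push_cast at h6 ⊢; omega
          · right
            rw [hshift (e - (i + 1)) (by omega)] at h6
            rw [show (e - (i + 1) + (1 : Int)) = e - i by ring] at h6
            exact h6
        · rw [p7]
          congr 2
          rw [show (s - i).toNat = (s - (i + 1)).toNat + 1 from by omega, List.drop_succ_cons]

lemma pvRuns_sound {u : List Char} {i s e v : Int} (h : (s, e, v) ∈ pvRuns u i) :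
    pvRunProps u i s e v :=
  pvRuns_sound_aux u.length u (le_refl _) i s e v h

lemma pvRuns_complete_aux : ∀ (n : Nat) (u : List Char), u.length ≤ n → ∀ (i j : Int), i ≤ j →
    pvDig (pvCharAt u (j - i)) = true →
    ∃ s e v, (s, e, v) ∈ pvRunsF n u i ∧ s ≤ j ∧ j < e := by
  intro n
  induction n with
  | zero =>
    intro u hu i j hij hd
    have : u = [] := List.length_eq_zero_iff.mp (by omega)
    subst this
    rw [pvCharAt_nil] at hd
    exact absurd hd (by decide)
  | succ n ihn =>
    intro u hu i j hij hd
    cases u with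
    | nil =>
      rw [pvCharAt_nil] at hd
      exact absurd hd (by decide)
    | cons c rest =>
      by_cases hdig : pvDig c = true
      · set k : Nat := ((c :: rest).takeWhile pvDig).length with hk
        clear_value k
        have htw : (c :: rest).takeWhile pvDig = c :: rest.takeWhile pvDig :=
          List.takeWhile_cons_of_pos hdig
        have hk1 : 1 ≤ k := by rw [hk, htw]; simp
        have hdrop : (c :: rest).dropWhile pvDig = (c :: rest).drop k := by
          conv_rhs => rw [← List.takeWhile_append_dropWhile (p := pvDig) (l := c :: rest)]
          rw [List.drop_left' hk.symm]
        by_cases hjk : j < i + (k : Int)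
        · exact ⟨i, i + (k : Int), _,
            by rw [pvRunsF_cons_pos n rest i hdig, ← hk]; exact List.mem_cons_self, hij, hjk⟩

        · push_neg at hjk
          have hlrest : ((c :: rest).dropWhile pvDig).length ≤ n := by
            rw [hdrop, List.length_drop]
            simp only [List.length_cons] at hu ⊢
            omega
          have hd' : pvDig (pvCharAt ((c :: rest).dropWhile pvDig) (j - (i + (k : Int)))) = true := by
            rw [hdrop, pvCharAt_drop k (by omega)]
            rw [show (j - (i + (k : Int)) + (k : Int)) = j - i by ring]
            exact hd
          obtain ⟨s, e, v, hm, hs, he⟩ := ihn _ hlrest (i + (k : Int)) j hjk hd'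
          exact ⟨s, e, v,
            by rw [pvRunsF_cons_pos n rest i hdig, ← hk]; exact List.mem_cons_of_mem _ hm, hs, he⟩
      · have hdig' : pvDig c = false := by simpa using hdig
        have hji : j ≠ i := by
          intro h
          rw [h, show (i - i : Int) = 0 by ring, pvCharAt_zero_cons] at hd
          rw [hdig'] at hd
          exact Bool.false_ne_true hd
        have hlrest : rest.length ≤ n := by
          simp only [List.length_cons] at hu; omega
        have hd' : pvDig (pvCharAt rest (j - (i + 1))) = true := by
          have h1 := pvCharAt_drop (t := c :: rest) 1 (i := j - (i + 1)) (by omega)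
          simp only [List.drop_one, List.tail_cons] at h1
          rw [h1, show (j - (i + 1) + ((1 : Nat) : Int)) = j - i by push_cast; ring]
          exact hd
        obtain ⟨s, e, v, hm, hs, he⟩ := ihn _ hlrest (i + 1) j (by omega) hd'
        exact ⟨s, e, v, by rw [pvRunsF_cons_neg n rest i hdig']; exact hm, hs, he⟩

lemma pvRuns_complete {u : List Char} {i j : Int} (hij : i ≤ j)
    (hd : pvDig (pvCharAt u (j - i)) = true) :
    ∃ s e v, (s, e, v) ∈ pvRuns u i ∧ s ≤ j ∧ j < e :=
  pvRuns_complete_aux u.length u (le_refl _) i j hij hd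

lemma pvRuns_uniq {u : List Char} {s e v s' e' v' c : Int}
    (h1 : (s, e, v) ∈ pvRuns u 0) (h2 : (s', e', v') ∈ pvRuns u 0)
    (hc1 : s ≤ c) (hc2 : c < e) (hc3 : s' ≤ c) (hc4 : c < e') :
    (s, e, v) = (s', e', v') := by
  obtain ⟨q1, q2, q3, q4, q5, q6, q7⟩ := pvRuns_sound h1
  obtain ⟨r1, r2, r3, r4, r5, r6, r7⟩ := pvRuns_sound h2
  simp only [Int.sub_zero, Int.zero_add] at q1 q2 q3 q4 q5 q6 q7 r1 r2 r3 r4 r5 r6 r7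
  have hss : s = s' := by
    by_contra hne
    rcases lt_or_gt_of_ne hne with hlt | hgt
    · have hdg := q4 (s' - 1) (by omega) (by omega)
      rcases r5 with h5 | h5
      · omega
      · rw [h5] at hdg; exact Bool.false_ne_true hdg
    · have hdg := r4 (s - 1) (by omega) (by omega)
      rcases q5 with h5 | h5
      · omega
      · rw [h5] at hdg; exact Bool.false_ne_true hdg
  subst hss
  have hee : e = e' := by
    by_contra hne
    rcases lt_or_gt_of_ne hne with hlt | hgt
    · have hdg := r4 e (by omega) (by omega)
      rcases q6 with h6 | h6
      · omega
      · rw [h6] at hdg; exact Bool.false_ne_true hdg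
    · have hdg := q4 e' (by omega) (by omega)
      rcases r6 with h6 | h6
      · omega
      · rw [h6] at hdg; exact Bool.false_ne_true hdg
  subst hee
  have hv : v = v' := by rw [q7, r7]
  rw [hv]

-- ---- B's inner fold ----

lemma pvBFold_none {r c : Int} {L : List (Int × Int × Int)}
    {st : PySem.Set (Int × Int) × List Int}
    (h : ∀ run ∈ L, ¬ (run.1 ≤ c ∧ c < run.2.1)) : pvBFold r c L st = st := by
  induction L generalizing st with
  | nil => rfl
  | cons a L ih =>
    unfold pvBFold
    rw [List.foldl_cons, if_neg (by
      intro hx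
      exact h a (List.mem_cons_self) ⟨hx.1, hx.2.1⟩)]
    exact ih (fun run hr => h run (List.mem_cons_of_mem _ hr))

lemma pvBFold_blocked {r c s e v : Int} {L : List (Int × Int × Int)}
    {st : PySem.Set (Int × Int) × List Int}
    (huniq : ∀ run ∈ L, run.1 ≤ c ∧ c < run.2.1 → run = (s, e, v))
    (hs : (r, s) ∈ st.1) : pvBFold r c L st = st := by
  induction L generalizing st with
  | nil => rfl
  | cons a L ih =>
    unfold pvBFold
    rw [List.foldl_cons, if_neg (by
      intro hx
      have := huniq a (List.mem_cons_self) ⟨hx.1, hx.2.1⟩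
      subst this
      exact hx.2.2 hs)]
    exact ih (fun run hr => huniq run (List.mem_cons_of_mem _ hr)) hs

lemma pvBFold_hit {r c s e v : Int} {L : List (Int × Int × Int)}
    {st : PySem.Set (Int × Int) × List Int}
    (hmem : (s, e, v) ∈ L)
    (huniq : ∀ run ∈ L, run.1 ≤ c ∧ c < run.2.1 → run = (s, e, v))
    (hsc : s ≤ c) (hce : c < e) (hs : (r, s) ∉ st.1) :
    pvBFold r c L st = (PySem.Set.add st.1 (r, s), st.2 ++ [v]) := by
  induction L generalizing st with
  | nil => simp at hmem
  | cons a L ih =>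
    by_cases ha : a = (s, e, v)
    · subst ha
      unfold pvBFold
      rw [List.foldl_cons, if_pos ⟨hsc, hce, hs⟩]
      exact pvBFold_blocked (fun run hr => huniq run (List.mem_cons_of_mem _ hr))
        (by simp [PySem.Set.mem_add])
    · have hnm : ¬ (a.1 ≤ c ∧ c < a.2.1) := by
        intro hx
        exact ha (huniq a (List.mem_cons_self) hx)
      have hmem' : (s, e, v) ∈ L := by
        rcases List.mem_cons.mp hmem with h | h
        · exact absurd h.symm ha
        · exact h
      unfold pvBFold
      rw [List.foldl_cons, if_neg (by intro hx; exact hnm ⟨hx.1, hx.2.1⟩)]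
      exact ih hmem' (fun run hr => huniq run (List.mem_cons_of_mem _ hr)) hs

-- ---- the invariant and the per-probe step ----

def pvInv (lines : List String) (w : Int) (vis tk : PySem.Set (Int × Int)) : Prop :=
  ∀ a b : Int, ((a, b) ∈ vis ↔
    ∃ s e v : Int, (s, e, v) ∈ pvRowRuns lines w a ∧ (a, s) ∈ tk ∧ s ≤ b ∧ b < e)

lemma pvStep_eq (lines : List String) (w : Int) (hw : 0 ≤ w) (r c : Int)
    (vis tk : PySem.Set (Int × Int)) (nos : List Int) (hInv : pvInv lines w vis tk) :
    pvInv lines w (pvAStep lines w (vis, nos) r c).1 (pvBStep lines w (tk, nos) r c).1 ∧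
    (pvAStep lines w (vis, nos) r c).2 = (pvBStep lines w (tk, nos) r c).2 := by
  by_cases hout : r < 0 ∨ (lines.length : Int) ≤ r ∨ c < 0 ∨ w ≤ c
  · -- out-of-range probe: both sides skip
    have hA : pvAStep lines w (vis, nos) r c = (vis, nos) := by
      unfold pvAStep; rw [if_pos hout]
    by_cases hcb : 0 ≤ c ∧ c < w
    · have hrow : r < 0 ∨ (lines.length : Int) ≤ r := by omega
      have hB : pvBStep lines w (tk, nos) r c = (tk, nos) := by
        unfold pvBStep
        rw [if_pos hcb]
        unfold pvRowRuns
        rw [if_pos hrow]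
        rfl
      rw [hA, hB]
      exact ⟨hInv, rfl⟩
    · have hB : pvBStep lines w (tk, nos) r c = (tk, nos) := by
        unfold pvBStep; rw [if_neg hcb]
      rw [hA, hB]
      exact ⟨hInv, rfl⟩
  · push_neg at hout
    obtain ⟨hr0, hrl, hc0, hcw⟩ := hout
    have hrow : ¬ (r < 0 ∨ (lines.length : Int) ≤ r) := by omega
    set t : List Char := pvRow lines r with ht
    have htd : t = (lines.getD r.toNat "").toList := by
      rw [ht]; unfold pvRow; rw [if_pos hr0]
    set u : List Char := t.take w.toNat with hu
    have hR : pvRowRuns lines w r = pvRuns u 0 := by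
      unfold pvRowRuns
      rw [if_neg hrow, hu, htd]
    have hulen : (u.length : Int) ≤ w := by
      rw [hu]
      simp only [List.length_take]
      omega
    have hbr : ∀ j : Int, 0 ≤ j → j < w → pvCharAt u j = pvCharAt t j := by
      intro j h0 hj
      rw [hu]
      exact pvCharAt_take h0 (by omega)
    by_cases hdig : pvDig (pvCharAt t c) = true
    · have hdigu : pvDig (pvCharAt u c) = true := by rw [hbr c hc0 hcw]; exact hdig
      have hcu : c < (u.length : Int) := by
        by_contra hcon
        rw [pvCharAt_out (Or.inr (by omega))] at hdigu
        exact absurd hdigu (by decide)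
      by_cases hvis : (r, c) ∈ vis
      · -- already visited: A appends nothing, B's matching run is already taken
        obtain ⟨s, e, v, hm, htk, hsb, hbe⟩ := (hInv r c).mp hvis
        rw [hR] at hm
        have hA : pvAStep lines w (vis, nos) r c = (vis, nos) := by
          unfold pvAStep
          rw [if_neg (by omega), if_neg (by simpa using hdig)]
          have hP : pvParseNo lines w r c vis = (none, vis) := by
            unfold pvParseNo; rw [if_pos hvis]
          rw [hP]
        have hB : pvBStep lines w (tk, nos) r c = (tk, nos) := by
          unfold pvBStep
          rw [if_pos ⟨hc0, hcw⟩, hR]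
          exact pvBFold_blocked (fun run hrun hmatch => by
            obtain ⟨s', e', v'⟩ := run
            exact pvRuns_uniq hrun hm hmatch.1 hmatch.2 hsb hbe) htk
        rw [hA, hB]
        exact ⟨hInv, rfl⟩
      · -- new run: A slides to its borders and records its cells, B takes the run
        obtain ⟨s, e, v, hm, hsc, hce⟩ :=
          pvRuns_complete (u := u) (i := 0) (j := c) hc0
            (by rw [Int.sub_zero]; exact hdigu)
        obtain ⟨q1, q2, q3, q4, q5, q6, q7⟩ := pvRuns_sound hm
        simp only [Int.sub_zero, Int.zero_add] at q1 q2 q3 q4 q5 q6 q7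
        have he_w : e ≤ w := by omega
        have htk : (r, s) ∉ tk := by
          intro hmem2
          exact hvis ((hInv r c).mpr ⟨s, e, v, by rw [hR]; exact hm, hmem2, hsc, hce⟩)
        have huniq : ∀ run ∈ pvRuns u 0, run.1 ≤ c ∧ c < run.2.1 → run = (s, e, v) := by
          intro run hrun hmatch
          obtain ⟨s', e', v'⟩ := run
          exact pvRuns_uniq hrun hm hmatch.1 hmatch.2 hsc hce
        obtain ⟨a1, a2, a3, a4⟩ :=
          pvSlideL_spec t (c.toNat + 1) c (by omega) (by push_cast; omega)
        obtain ⟨b1, b2, b3, b4⟩ :=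
          pvSlideR_spec t w ((w - c).toNat) c (by omega) (by push_cast; omega)
        set l := pvSlideL t (c.toNat + 1) c with hldef
        set rr := pvSlideR t w ((w - c).toNat) c with hrrdef
        have hls : l + 1 = s := by
          rcases lt_trichotomy (l + 1) s with h | h | h
          · exfalso
            have hd1 : pvDig (pvCharAt t (s - 1)) = true := a3 (s - 1) (by omega) (by omega)
            rcases q5 with h5 | h5
            · omega
            · rw [← hbr (s - 1) (by omega) (by omega)] at hd1
              rw [h5] at hd1; exact Bool.false_ne_true hd1
          · exact h
          · exfalso
            have hd1 : pvDig (pvCharAt u l) = true := by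
              have := q4 l (by omega) (by omega)
              exact this
            rw [hbr l (by omega) (by omega)] at hd1
            rcases a4 with h4 | h4
            · omega
            · rw [h4] at hd1; exact Bool.false_ne_true hd1
        have hun : u.length = min w.toNat t.length := by
          rw [hu]; exact List.length_take
        have hre : rr = e := by
          rcases lt_trichotomy rr e with h | h | h
          · exfalso
            have hd1 : pvDig (pvCharAt u rr) = true := q4 rr (by omega) h
            rw [hbr rr (by omega) (by omega)] at hd1
            rcases b4 with h4 | h4
            · omega
            · rw [h4] at hd1; exact Bool.false_ne_true hd1
          · exact h
          · exfalso
            have hd1 : pvDig (pvCharAt t e) = true := b3 e (by omega) h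
            rcases q6 with h6 | h6
            · have hteq : (t.length : Int) ≤ e := by omega
              rw [pvCharAt_out (Or.inr hteq)] at hd1
              exact absurd hd1 (by decide)
            · rw [← hbr e (by omega) (by omega)] at hd1
              rw [h6] at hd1; exact Bool.false_ne_true hd1
        have hP : pvParseNo lines w r c vis =
            (some ((PySem.Int.ofStr? (String.ofList
                (PySem.List.slice t (some (l + 1)) (some rr)))).getD 0),
             (PySem.List.pyRange (l + 1) rr 1).foldl
               (fun v2 i2 => PySem.Set.add v2 (r, i2)) vis) := by
          unfold pvParseNo
          rw [if_neg hvis]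
        have hslice : PySem.List.slice t (some (l + 1)) (some rr) =
            (u.drop s.toNat).take (e - s).toNat := by
          rw [hls, hre, PySem.List.slice_toNat t q1 (by omega)]
          rw [hu, List.drop_take, List.take_take]
          congr 1
          omega
        have hval : (PySem.Int.ofStr? (String.ofList
            (PySem.List.slice t (some (l + 1)) (some rr)))).getD 0 = v := by
          rw [hslice, q7]
        have hA : pvAStep lines w (vis, nos) r c =
            ((PySem.List.pyRange s e 1).foldl (fun v2 i2 => PySem.Set.add v2 (r, i2)) vis,
             nos ++ [v]) := by
          unfold pvAStep
          rw [if_neg (by omega), if_neg (by simpa using hdig), hP, hval, hls, hre]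
        have hB : pvBStep lines w (tk, nos) r c =
            (PySem.Set.add tk (r, s), nos ++ [v]) := by
          unfold pvBStep
          rw [if_pos ⟨hc0, hcw⟩, hR]
          exact pvBFold_hit hm huniq hsc hce htk
        rw [hA, hB]
        refine ⟨?_, rfl⟩
        intro a b
        have hmemv : ∀ q : Int × Int,
            (q ∈ (PySem.List.pyRange s e 1).foldl
              (fun v2 i2 => PySem.Set.add v2 (r, i2)) vis) ↔
            (q ∈ vis ∨ ∃ i2 ∈ PySem.List.pyRange s e 1, q = (r, i2)) := fun q =>
          PySem.Set.mem_foldl_add (f := fun i2 => ((r, i2) : Int × Int)) (l := PySem.List.pyRange s e 1) (s := vis) (y := q)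
        constructor
        · intro hmem2
          rcases (hmemv (a, b)).mp hmem2 with hold | ⟨i2, hi2, heq⟩
          · obtain ⟨s', e', v', hm', htk', h1, h2⟩ := (hInv a b).mp hold
            exact ⟨s', e', v', hm', by rw [PySem.Set.mem_add]; exact Or.inl htk', h1, h2⟩
          · have ha2 : a = r := congrArg Prod.fst heq
            have hb2 : b = i2 := congrArg Prod.snd heq
            have hi2' := (PySem.List.mem_pyRange_one).mp hi2
            refine ⟨s, e, v, ?_, ?_, by omega, by omega⟩
            · rw [ha2, hR]; exact hm
            · rw [ha2, PySem.Set.mem_add]; exact Or.inr rfl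
        · rintro ⟨s', e', v', hm', htk', h1, h2⟩
          rw [PySem.Set.mem_add] at htk'
          rcases htk' with hin | heq2
          · exact (hmemv (a, b)).mpr (Or.inl ((hInv a b).mpr ⟨s', e', v', hm', hin, h1, h2⟩))
          · have ha2 : a = r := congrArg Prod.fst heq2
            have hs2 : s' = s := congrArg Prod.snd heq2
            rw [ha2] at hm'
            rw [hR] at hm'
            rw [hs2] at hm' h1
            obtain ⟨_, he'2, _, _, _, _, _⟩ := pvRuns_sound hm'
            have heqr := pvRuns_uniq hm hm' (le_refl s) (by omega) (le_refl s)
              (by simpa using he'2)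
            have hee : e' = e := by
              have := congrArg (fun p => p.2.1) heqr
              simpa using this.symm
            rw [ha2]
            refine (hmemv (r, b)).mpr (Or.inr ⟨b, ?_, rfl⟩)
            exact (PySem.List.mem_pyRange_one).mpr ⟨h1, by omega⟩
    · -- not a digit: A skips, B finds no matching run
      have hA : pvAStep lines w (vis, nos) r c = (vis, nos) := by
        unfold pvAStep
        rw [if_neg (by omega), if_pos (by simpa using hdig)]
      have hB : pvBStep lines w (tk, nos) r c = (tk, nos) := by
        unfold pvBStep
        rw [if_pos ⟨hc0, hcw⟩, hR]
        refine pvBFold_none (fun run hrun hmatch => ?_)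
        obtain ⟨s', e', v'⟩ := run
        obtain ⟨_, _, _, q4, _, _, _⟩ := pvRuns_sound hrun
        have := q4 c hmatch.1 hmatch.2
        rw [Int.sub_zero, hbr c hc0 hcw] at this
        exact hdig this
      rw [hA, hB]
      exact ⟨hInv, rfl⟩

lemma pvFold_eq (lines : List String) (w : Int) (hw : 0 ≤ w) :
    ∀ (ps : List (Int × Int)) (vis tk : PySem.Set (Int × Int)) (nos : List Int),
    pvInv lines w vis tk →
    (ps.foldl (fun st p => pvAStep lines w st p.1 p.2) (vis, nos)).2 =
    (ps.foldl (fun st p => pvBStep lines w st p.1 p.2) (tk, nos)).2 := by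
  intro ps
  induction ps with
  | nil => intro vis tk nos _; rfl
  | cons p ps ih =>
    intro vis tk nos hInv
    obtain ⟨hInv', hsec⟩ := pvStep_eq lines w hw p.1 p.2 vis tk nos hInv
    rw [List.foldl_cons, List.foldl_cons]
    have hA : pvAStep lines w (vis, nos) p.1 p.2 =
        ((pvAStep lines w (vis, nos) p.1 p.2).1, (pvAStep lines w (vis, nos) p.1 p.2).2) := rfl
    have hB : pvBStep lines w (tk, nos) p.1 p.2 =
        ((pvBStep lines w (tk, nos) p.1 p.2).1, (pvAStep lines w (vis, nos) p.1 p.2).2) := by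
      rw [hsec]
    rw [hA, hB]
    exact ih _ _ _ hInv'

lemma pvAStep_nil (w : Int) (st : PySem.Set (Int × Int) × List Int) (yl xl : Int) :
    pvAStep [] w st yl xl = st := by
  unfold pvAStep
  rw [if_pos (by simp; omega)]

theorem pv_main (lines : List String) (y x : Int) :
    get_adj_no lines y x = get_adj_no_alt lines y x := by
  by_cases hnil : lines = []
  · subst hnil
    simp [get_adj_no, get_adj_no_alt, pvDirections, pvAStep_nil]
  · unfold get_adj_no get_adj_no_alt
    rw [if_neg hnil]
    have hw : (0 : Int) ≤ ((lines.headD "").toList.length : Int) := by positivity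
    have hInv0 : pvInv lines ((lines.headD "").toList.length : Int) [] [] := by
      intro a b; simp
    have hA : pvDirections.foldl
        (fun st d => pvAStep lines ((lines.headD "").toList.length : Int) st (y + d.2) (x + d.1))
        ([], []) =
        ([(y-1, x-1), (y, x-1), (y+1, x-1), (y-1, x), (y+1, x),
          (y-1, x+1), (y, x+1), (y+1, x+1)].foldl
          (fun st p => pvAStep lines ((lines.headD "").toList.length : Int) st p.1 p.2)
          ([], [])) := by
      simp only [pvDirections, List.foldl_cons, List.foldl_nil, sub_eq_add_neg, add_zero]
    exact (congrArg Prod.snd hA).trans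
      (pvFold_eq lines _ hw _ [] [] [] hInv0)

-- ===== VERDICT (by name: the statement is the Claim_ definition above) =====
theorem get_adj_no_spec : Claim_equal_get_adj_no := by
  intro lines y x _ _
  unfold Spec_get_adj_no
  exact pv_main lines y x
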